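-- pv_equiv track=rewrite | github.com/OpenStoryArc/OpenStory | scripts/inspect_sentence_dedup.py | classify_duplication_pattern
-- ===== SOURCE A (Python) =====
-- def event_ids_set(sentence: dict) -> frozenset[str]:
--     """The set of event_ids referenced by a sentence pattern."""
--     return frozenset(sentence.get("event_ids") or [])
--
-- def classify_duplication_pattern(group: list[dict]) -> str:
--     """
--     For a group of sentences with the same (turn, scope_depth), classify
--     what kind of duplication is happening.
--
--     Returns one of:
--       'unique'              — only one row, no duplication
--       'identical-event-ids' — multiple rows, all share the same event_ids
--                               → H1 (wall-clock at detection time)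
--       'overlapping'         — multiple rows, event_ids overlap but not identical
--                               → H2 (synthetic boundary events differ across runs)
--       'disjoint'            — multiple rows, no shared event_ids
--                               → not duplication, different content under same key
--     """
--     if len(group) <= 1:
--         return "unique"
--
--     sets = [event_ids_set(s) for s in group]
--     first = sets[0]
--     if all(s == first for s in sets[1:]):
--         return "identical-event-ids"
--
--     intersection = first
--     for s in sets[1:]:
--         intersection = intersection & s
--     if intersection:
--         return "overlapping"
--     return "disjoint"
-- ===== SOURCE B (Python) =====
-- def classify_duplication_pattern(group: list[dict]) -> str:
--     n = len(group)
--     if n <= 1: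
--         return "unique"
--     # Frequency table: for each event_id, in how many rows does it occur?
--     # (dict.fromkeys dedupes ids within one row, so each row counts at most once)
--     counts = {}
--     for eid in [e for s in group for e in dict.fromkeys(s.get("event_ids") or [])]:
--         counts[eid] = counts.get(eid, 0) + 1
--     if all(c == n for c in counts.values()):
--         return "identical-event-ids"
--     if n in counts.values():
--         return "overlapping"
--     return "disjoint"
-- ===== Notes on version B (the rewrite author's own statement) =====
-- stated objective: alternative
-- what changed: B performs no set algebra at all: instead of A's per-row frozensets with an all-equal-to-first scan and a second intersection loop, B builds one global frequency table counting in how many rows each event_id occurs, and classifies purely from the counts (all counts equal the row count iff all id sets are identical; some count equals the row count iff the intersection is non-empty).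
import Mathlib
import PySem

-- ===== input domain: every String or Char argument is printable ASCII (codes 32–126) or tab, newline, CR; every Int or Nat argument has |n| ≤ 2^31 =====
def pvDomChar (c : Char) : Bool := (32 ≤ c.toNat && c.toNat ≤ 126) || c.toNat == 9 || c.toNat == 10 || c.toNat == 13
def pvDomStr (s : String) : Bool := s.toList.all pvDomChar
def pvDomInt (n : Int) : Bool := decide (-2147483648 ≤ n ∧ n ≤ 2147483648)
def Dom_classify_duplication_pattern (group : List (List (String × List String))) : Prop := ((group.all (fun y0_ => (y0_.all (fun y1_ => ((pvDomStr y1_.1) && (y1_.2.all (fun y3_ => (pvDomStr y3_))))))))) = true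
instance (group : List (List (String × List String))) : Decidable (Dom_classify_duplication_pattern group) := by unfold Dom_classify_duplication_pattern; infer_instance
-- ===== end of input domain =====

-- B replaces A's set algebra (all-equal-to-first scan over frozensets plus an intersection
-- loop) by one global frequency table counting in how many rows each event_id occurs,
-- classifying purely from the counts (objective: alternative algorithm, same cost).


-- ===== PORT A =====
-- frozenset(sentence.get("event_ids") or []) — 'or []' only replaces None/[] by [], so getD is exact
def event_ids_set (sentence : List (String × List String)) : PySem.Set String :=
  PySem.Set.ofList (PySem.Dict.getD (PySem.Dict.mk sentence) "event_ids" [])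

def classify_duplication_pattern (group : List (List (String × List String))) : String :=
  if group.length ≤ 1 then "unique"
  else
    let sets := group.map event_ids_set
    let first := PySem.List.pyGetD sets 0 []
    if (PySem.List.slice sets (some 1) none).all (fun s => PySem.Set.equal s first) then
      "identical-event-ids"
    else
      let intersection :=
        (PySem.List.slice sets (some 1) none).foldl (fun acc s => PySem.Set.inter acc s) first
      if intersection ≠ [] then "overlapping" else "disjoint"

-- ===== PORT B =====
-- dict.fromkeys(xs) (ordered dedup within one row) is PySem.List.dedup
def row_ids (sentence : List (String × List String)) : List String :=
  PySem.List.dedup (PySem.Dict.getD (PySem.Dict.mk sentence) "event_ids" [])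

def classify_duplication_pattern_alt (group : List (List (String × List String))) : String :=
  if group.length ≤ 1 then "unique"
  else
    let n : Int := group.length
    let counts := (group.flatMap (fun s => row_ids s)).foldl
        (fun d x => d.insert x (d.getD x 0 + 1)) PySem.Dict.empty
    if counts.values.all (fun c => c == n) then "identical-event-ids"
    else if counts.values.contains n then "overlapping"
    else "disjoint"

-- ===== PRECONDITION & SPEC =====
def Spec_classify_duplication_pattern (group : List (List (String × List String))) (out : String) : Prop := out = classify_duplication_pattern_alt group
instance (group : List (List (String × List String))) (out : String) : Decidable (Spec_classify_duplication_pattern group out) := by unfold Spec_classify_duplication_pattern; infer_instance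

-- ===== CLAIM (what is proved, stated in full; the proofs are below) =====
def Claim_equal_classify_duplication_pattern : Prop := ∀ (group : List (List (String × List String))), Dom_classify_duplication_pattern group → Spec_classify_duplication_pattern group (classify_duplication_pattern group)

-- ===== LEMMAS AND PROOFS =====

theorem row_ids_eq (s : List (String × List String)) : row_ids s = event_ids_set s := by
  simp [row_ids, event_ids_set]

theorem row_ids_nodup (s : List (String × List String)) : (row_ids s).Nodup := by
  simp [row_ids]

-- counting a value in a flatMap of Nodup rows = in how many rows it occurs
theorem count_flatMap_nodup {α β : Type} [DecidableEq β] (f : α → List β)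
    (hf : ∀ a, (f a).Nodup) (l : List α) (v : β) :
    ((l.flatMap f).count v) = l.countP (fun a => decide (v ∈ f a)) := by
  induction l with
  | nil => simp
  | cons a t ih =>
    have hcnt : (f a).count v = if v ∈ f a then 1 else 0 := by
      split
      · exact List.count_eq_one_of_mem (hf a) ‹_›
      · exact List.count_eq_zero_of_not_mem ‹_›
    simp [List.flatMap_cons, List.count_append, ih, List.countP_cons, hcnt]
    split <;> simp_all <;> omega

theorem mem_foldl_inter (l : List (PySem.Set String)) (a : PySem.Set String) (x : String) :
    x ∈ l.foldl (fun acc s => PySem.Set.inter acc s) a ↔ x ∈ a ∧ ∀ s ∈ l, x ∈ s := by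
  induction l generalizing a with
  | nil => simp
  | cons h t ih => simp [List.foldl, ih, PySem.Set.mem_inter]; tauto

-- an id occurs in every row  ↔  its global count equals the number of rows
theorem count_eq_len_iff (a : List (String × List String)) (l : List (List (String × List String))) (v : String) :
    (((a :: l).flatMap row_ids).count v = (a :: l).length) ↔ ∀ s ∈ a :: l, v ∈ event_ids_set s := by
  rw [count_flatMap_nodup row_ids row_ids_nodup]
  rw [List.countP_eq_length]
  simp [row_ids_eq]

theorem mem_flat_iff (a : List (String × List String)) (l : List (List (String × List String))) (v : String) :
    v ∈ (a :: l).flatMap row_ids ↔ ∃ s ∈ a :: l, v ∈ event_ids_set s := by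
  simp [List.mem_flatMap, row_ids_eq]

-- A's 'all sets equal the first'  ↔  B's 'every counter value equals the row count'
theorem ident_iff (a : List (String × List String)) (l : List (List (String × List String))) :
    ((l.map event_ids_set).all (fun s => PySem.Set.equal s (event_ids_set a)) = true)
    ↔ (((PySem.Dict.counter ((a :: l).flatMap row_ids)).values).all
        (fun c => c == (((a :: l).length : Int))) = true) := by
  have hv : (PySem.Dict.counter ((a :: l).flatMap row_ids)).values
      = (PySem.Set.ofList ((a :: l).flatMap row_ids)).map
          (fun k => ((((a :: l).flatMap row_ids).count k : Int))) := by
    simp [PySem.Dict.values, PySem.Dict.items_counter]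
  rw [hv]
  simp only [List.all_map, List.all_eq_true, Function.comp,
    beq_iff_eq, Nat.cast_inj, PySem.Set.mem_ofList, PySem.Set.equal_iff]
  constructor
  · intro h k hk
    rw [count_eq_len_iff]
    rw [mem_flat_iff] at hk
    obtain ⟨s0, hs0, hks0⟩ := hk
    have hka : k ∈ event_ids_set a := by
      rcases List.mem_cons.mp hs0 with h0 | h0
      · subst h0; exact hks0
      · exact (h s0 h0 k).mp hks0
    intro s hs
    rcases List.mem_cons.mp hs with h0 | h0
    · subst h0; exact hka
    · exact (h s h0 k).mpr hka
  · intro h t ht k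
    constructor
    · intro hk
      have hm : k ∈ (a :: l).flatMap row_ids := (mem_flat_iff a l k).mpr ⟨t, List.mem_cons_of_mem _ ht, hk⟩
      exact ((count_eq_len_iff a l k).mp (h k hm)) a (List.mem_cons_self)
    · intro hk
      have hm : k ∈ (a :: l).flatMap row_ids := (mem_flat_iff a l k).mpr ⟨a, List.mem_cons_self, hk⟩
      exact ((count_eq_len_iff a l k).mp (h k hm)) t (List.mem_cons_of_mem _ ht)

-- A's 'intersection non-empty'  ↔  B's 'some counter value equals the row count'
theorem overlap_iff (a : List (String × List String)) (l : List (List (String × List String))) :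
    (((l.map event_ids_set).foldl (fun acc s => PySem.Set.inter acc s) (event_ids_set a)) ≠ [])
    ↔ (((PySem.Dict.counter ((a :: l).flatMap row_ids)).values).contains
        (((a :: l).length : Int)) = true) := by
  have hv : (PySem.Dict.counter ((a :: l).flatMap row_ids)).values
      = (PySem.Set.ofList ((a :: l).flatMap row_ids)).map
          (fun k => ((((a :: l).flatMap row_ids).count k : Int))) := by
    simp [PySem.Dict.values, PySem.Dict.items_counter]
  rw [hv]
  rw [Ne, List.eq_nil_iff_forall_not_mem]
  push_neg
  simp only [List.contains_iff_mem, List.mem_map, PySem.Set.mem_ofList, Nat.cast_inj]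
  constructor
  · rintro ⟨x, hx⟩
    obtain ⟨hxa, hxl⟩ := (mem_foldl_inter _ _ x).mp hx
    have hall : ∀ s ∈ a :: l, x ∈ event_ids_set s := by
      intro s hs
      rcases List.mem_cons.mp hs with h0 | h0
      · subst h0; exact hxa
      · exact hxl _ (List.mem_map_of_mem h0)
    exact ⟨x, (mem_flat_iff a l x).mpr ⟨a, List.mem_cons_self, hxa⟩, (count_eq_len_iff a l x).mpr hall⟩
  · rintro ⟨x, hxm, hcnt⟩
    have hall := (count_eq_len_iff a l x).mp hcnt
    refine ⟨x, (mem_foldl_inter _ _ x).mpr ⟨hall a List.mem_cons_self, ?_⟩⟩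
    intro s hs
    obtain ⟨t, ht, rfl⟩ := List.mem_map.mp hs
    exact hall t (List.mem_cons_of_mem _ ht)

theorem main_lemma (group : List (List (String × List String))) :
    classify_duplication_pattern group = classify_duplication_pattern_alt group := by
  unfold classify_duplication_pattern classify_duplication_pattern_alt
  cases group with
  | nil => simp
  | cons a l =>
    by_cases hlen : (a :: l).length ≤ 1
    · have hl : l = [] := by cases l with | nil => rfl | cons b t => simp at hlen
      subst hl; simp
    · simp only [hlen, if_false, List.map_cons, PySem.List.slice_from_one, List.tail_cons,
        PySem.Dict.foldl_insert_getD_add_one_eq_counter]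
      have hget : PySem.List.pyGetD (event_ids_set a :: List.map event_ids_set l) 0 [] = event_ids_set a := by
        simp [PySem.List.pyGetD, PySem.List.pyGet?, PySem.List.pyIdx?]
      rw [hget]
      by_cases h1 : ((List.map event_ids_set l).all fun s => PySem.Set.equal s (event_ids_set a)) = true
      · rw [if_pos h1, if_pos ((ident_iff a l).mp h1)]
      · rw [if_neg h1, if_neg (fun h => h1 ((ident_iff a l).mpr h))]
        by_cases h3 : List.foldl (fun acc s => PySem.Set.inter acc s) (event_ids_set a) (List.map event_ids_set l) ≠ []
        · rw [if_pos h3, if_pos ((overlap_iff a l).mp h3)]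
        · rw [if_neg h3, if_neg (fun h => h3 ((overlap_iff a l).mpr h))]

-- ===== VERDICT (by name: the statement is the Claim_ definition above) =====
theorem classify_duplication_pattern_spec : Claim_equal_classify_duplication_pattern := by
  intro group _
  exact main_lemma group
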